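-- pv_equiv track=rewrite | github.com/yue-w/LeetCode | problems/2398. Maximum Number of Robots Within Budget.py | in_budget
-- ===== SOURCE A (Python) =====
-- from collections import deque
--
-- def in_budget(k, chargeTimes, runningCosts, budget):
--     n = len(chargeTimes)
--     sumv = 0
--     dq = deque()
--     for i in range(n):
--         sumv += runningCosts[i]
--         while dq and chargeTimes[dq[-1]] <= chargeTimes[i]:
--             dq.pop()
--         dq.append(i)
--
--         while dq and dq[0] <= i - k:
--             dq.popleft()
--
--         if i - k + 1 >= 0:
--             if chargeTimes[dq[0]] + k * sumv <= budget:
--                 return True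
--             sumv -= runningCosts[i - k + 1]
--
--     return False
-- ===== SOURCE B (Python) =====
-- def in_budget(k, chargeTimes, runningCosts, budget):
--     n = len(chargeTimes)
--     prefix = [0]
--     for c in runningCosts[:n]:
--         prefix.append(prefix[-1] + c)
--     for j in range(n - k + 1):
--         if max(chargeTimes[j:j + k]) + k * (prefix[j + k] - prefix[j]) <= budget:
--             return True
--     return False
-- ===== Notes on version B (the rewrite author's own statement) =====
-- stated objective: simpler
-- what changed: Replaced the single-pass monotonic-deque sliding window with prefix sums plus a direct per-window scan: for each window start j test max(chargeTimes[j:j+k]) + k*(prefix[j+k]-prefix[j]) <= budget.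
-- outside the precondition, e.g. on in_budget(0, [], [], 0): A returns False, B raises ValueError; on in_budget(1, [1, 2, 3], [1], 10): A returns True, B returns True
import Mathlib
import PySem

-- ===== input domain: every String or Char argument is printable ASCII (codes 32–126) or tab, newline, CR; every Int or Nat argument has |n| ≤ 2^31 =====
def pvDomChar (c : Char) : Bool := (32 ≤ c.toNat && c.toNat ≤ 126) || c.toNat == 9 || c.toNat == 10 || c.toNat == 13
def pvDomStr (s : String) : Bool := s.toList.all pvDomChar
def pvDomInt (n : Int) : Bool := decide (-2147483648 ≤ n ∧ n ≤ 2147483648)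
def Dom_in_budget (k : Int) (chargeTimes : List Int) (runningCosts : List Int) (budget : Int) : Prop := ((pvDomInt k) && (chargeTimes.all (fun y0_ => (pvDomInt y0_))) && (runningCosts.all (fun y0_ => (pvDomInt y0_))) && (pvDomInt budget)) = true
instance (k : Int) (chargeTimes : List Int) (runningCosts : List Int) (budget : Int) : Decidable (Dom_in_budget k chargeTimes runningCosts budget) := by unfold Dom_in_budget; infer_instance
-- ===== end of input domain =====

-- B replaces A's monotonic-deque sliding window by prefix sums plus a direct max-scan per window (objective: simpler).

-- ===== PORT A =====
-- the `while dq and chargeTimes[dq[-1]] <= chargeTimes[i]: dq.pop()` loop: pop from the back while the predicate holds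
def pvPopBackWhile (p : Nat → Bool) : List Nat → List Nat
  | [] => []
  | x :: xs =>
    match pvPopBackWhile p xs with
    | [] => if p x then [] else [x]
    | r => x :: r

-- the `for i in range(n)` loop of A, with early return; dq holds indices (front = head)
def in_budget_go (k : Int) (chargeTimes runningCosts : List Int) (budget : Int) (n i : Nat)
    (sumv : Int) (dq : List Nat) : Bool :=
  if h : i < n then
    let sumv1 := sumv + PySem.List.pyGetD runningCosts (i : Int) 0
    let dq1 := pvPopBackWhile
      (fun j => decide (PySem.List.pyGetD chargeTimes (j : Int) 0 ≤ PySem.List.pyGetD chargeTimes (i : Int) 0)) dq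
    let dq2 := dq1 ++ [i]
    let dq3 := dq2.dropWhile (fun (j : Nat) => decide ((j : Int) ≤ (i : Int) - k))
    if (i : Int) - k + 1 ≥ 0 then
      if PySem.List.pyGetD chargeTimes ((dq3.headD (0 : Nat) : Nat) : Int) 0 + k * sumv1 ≤ budget then true
      else in_budget_go k chargeTimes runningCosts budget n (i + 1)
        (sumv1 - PySem.List.pyGetD runningCosts ((i : Int) - k + 1) 0) dq3
    else in_budget_go k chargeTimes runningCosts budget n (i + 1) sumv1 dq3
  else false
termination_by n - i

def in_budget (k : Int) (chargeTimes : List Int) (runningCosts : List Int) (budget : Int) : Bool :=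
  in_budget_go k chargeTimes runningCosts budget chargeTimes.length 0 0 []

-- ===== PORT B =====
def in_budget_alt (k : Int) (chargeTimes : List Int) (runningCosts : List Int) (budget : Int) : Bool :=
  let n := chargeTimes.length
  let pfx := (PySem.List.slice runningCosts none (some (n : Int))).foldl
    (fun ps c => ps ++ [PySem.List.pyGetD ps (-1) 0 + c]) [0]
  (PySem.List.pyRange 0 ((n : Int) - k + 1) 1).any (fun j =>
    decide ((PySem.List.max? (PySem.List.slice chargeTimes (some j) (some (j + k))) (fun y => y)).getD 0
      + k * (PySem.List.pyGetD pfx (j + k) 0 - PySem.List.pyGetD pfx j 0) ≤ budget))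

-- ===== PRECONDITION & SPEC =====
-- Pre_ excludes k ≤ 0 (there A raises IndexError on the empty deque whenever chargeTimes is nonempty,
-- and on empty chargeTimes A's False is unreachable for B, which raises ValueError on max of an empty slice)
-- and runningCosts shorter than chargeTimes (there A in general raises IndexError while summing;
-- A returns only when an early window already fits, and B returns the same True there).
def Pre_in_budget (k : Int) (chargeTimes : List Int) (runningCosts : List Int) (budget : Int) : Prop :=
  1 ≤ k ∧ chargeTimes.length ≤ runningCosts.length
instance (k : Int) (chargeTimes : List Int) (runningCosts : List Int) (budget : Int) : Decidable (Pre_in_budget k chargeTimes runningCosts budget) := by unfold Pre_in_budget; infer_instance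

def pvWitness_in_budget : Int × List Int × List Int × Int := (2, [3, 5], [1, 1], 100)

def Spec_in_budget (k : Int) (chargeTimes : List Int) (runningCosts : List Int) (budget : Int) (out : Bool) : Prop := out = in_budget_alt k chargeTimes runningCosts budget
instance (k : Int) (chargeTimes : List Int) (runningCosts : List Int) (budget : Int) (out : Bool) : Decidable (Spec_in_budget k chargeTimes runningCosts budget out) := by unfold Spec_in_budget; infer_instance

-- ===== CLAIM (what is proved, stated in full; the proofs are below) =====
def Claim_equal_in_budget : Prop := ∀ (k : Int) (chargeTimes : List Int) (runningCosts : List Int) (budget : Int), Dom_in_budget k chargeTimes runningCosts budget → Pre_in_budget k chargeTimes runningCosts budget → Spec_in_budget k chargeTimes runningCosts budget (in_budget k chargeTimes runningCosts budget)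

-- ===== LEMMAS AND PROOFS =====

-- window lists, window sums, window maxima
def pvWin (l : List Int) (lo len : Nat) : List Int :=
  (List.range' lo len).map (fun m => l.getD m 0)

def pvSum (rc : List Int) (lo len : Nat) : Int := (pvWin rc lo len).sum

def pvWMax (ct : List Int) (j K : Nat) : Int :=
  (pvWin ct (j + 1) (K - 1)).foldl max (ct.getD j 0)

-- the canonical per-window test shared by both sides
def pvOk (ct rc : List Int) (budget : Int) (K j : Nat) : Bool :=
  decide (pvWMax ct j K + (K : Int) * pvSum rc j K ≤ budget)

-- "index j strictly dominates every later index up to i"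
def pvBeatsB (ct : List Int) (j i : Nat) : Bool :=
  (List.range' (j + 1) (i - j)).all (fun m => decide (ct.getD m 0 < ct.getD j 0))

-- deque contents after the iteration for index i has completed
def pvDq (ct : List Int) (K i : Nat) : List Nat :=
  (List.range (i + 1)).filter (fun j => decide (i < j + K) && pvBeatsB ct j i)

-- deque contents on entry to iteration i
def pvEntryDq (ct : List Int) (K : Nat) : Nat → List Nat
  | 0 => []
  | i + 1 => pvDq ct K i

-- running sum on entry to iteration i
def pvEntrySum (rc : List Int) (K i : Nat) : Int := pvSum rc (i - (K - 1)) (min i (K - 1))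

lemma pvWin_succ (l : List Int) (lo len : Nat) :
    pvWin l lo (len + 1) = pvWin l lo len ++ [l.getD (lo + len) 0] := by
  simp [pvWin, List.range'_1_concat]

lemma pvWin_cons (l : List Int) (lo len : Nat) :
    pvWin l lo (len + 1) = l.getD lo 0 :: pvWin l (lo + 1) len := by
  simp [pvWin, List.range'_succ]

lemma pvSum_succ (rc : List Int) (lo len : Nat) :
    pvSum rc lo (len + 1) = pvSum rc lo len + rc.getD (lo + len) 0 := by
  simp [pvSum, pvWin_succ]

lemma pvSum_cons (rc : List Int) (lo len : Nat) :
    pvSum rc lo (len + 1) = rc.getD lo 0 + pvSum rc (lo + 1) len := by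
  simp [pvSum, pvWin_cons]

-- the while-pop-from-the-back loop: on a list along which p is upward closed it is a filter
lemma pvPopBackWhile_eq_filter (p : Nat → Bool) (l : List Nat)
    (h : l.Pairwise (fun a b => p a = true → p b = true)) :
    pvPopBackWhile p l = l.filter (fun x => !p x) := by
  induction l with
  | nil => rfl
  | cons x xs ih =>
    have hx : ∀ b ∈ xs, p x = true → p b = true := (List.pairwise_cons.mp h).1
    have ih' := ih (List.pairwise_cons.mp h).2
    rw [pvPopBackWhile, ih']
    cases hr : xs.filter (fun x => !p x) with
    | nil =>
      by_cases hpx : p x = true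
      · simp [List.filter_cons, hpx, hr]
      · simp [List.filter_cons, Bool.eq_false_iff.mpr hpx, hr]
    | cons y ys =>
      have hpx : p x = false := by
        by_contra hc
        have hpx' : p x = true := by
          cases hxe : p x with
          | false => exact absurd hxe hc
          | true => rfl
        have hnil : xs.filter (fun x => !p x) = [] := by
          apply List.filter_eq_nil_iff.mpr
          intro a ha
          simp [hx a ha hpx']
        rw [hnil] at hr
        simp at hr
      simp [List.filter_cons, hpx, hr]

-- dropWhile of a downward-closed predicate on a sorted list is a filter
lemma pvDropWhile_eq_filter (d : Nat → Bool) (l : List Nat)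
    (hs : l.Pairwise (· < ·)) (hd : ∀ a b : Nat, a ≤ b → d b = true → d a = true) :
    l.dropWhile d = l.filter (fun x => !d x) := by
  induction l with
  | nil => rfl
  | cons x xs ih =>
    have hlt : ∀ b ∈ xs, x < b := (List.pairwise_cons.mp hs).1
    by_cases hx : d x = true
    · rw [List.dropWhile_cons_of_pos hx, List.filter_cons_of_neg (by simp [hx]),
        ih (List.pairwise_cons.mp hs).2]
    · have hx' : d x = false := by
        cases hxe : d x with
        | false => rfl
        | true => exact absurd hxe hx
      rw [List.dropWhile_cons_of_neg (by simp [hx']), List.filter_cons_of_pos (by simp [hx'])]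
      congr 1
      symm
      apply List.filter_eq_self.mpr
      intro a ha
      have hda : d a = false := by
        cases hae : d a with
        | false => rfl
        | true => exact absurd (hd x a (le_of_lt (hlt a ha)) hae) (by simp [hx'])
      simp [hda]

lemma pvDq_sorted (ct : List Int) (K i : Nat) : (pvDq ct K i).Pairwise (· < ·) :=
  List.Pairwise.filter _ List.pairwise_lt_range

lemma pvDq_mem (ct : List Int) (K i j : Nat) :
    j ∈ pvDq ct K i ↔ j ≤ i ∧ i < j + K ∧ pvBeatsB ct j i = true := by
  simp [pvDq, List.mem_filter, List.mem_range, Nat.lt_succ_iff, and_assoc]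

lemma pvBeatsB_lt (ct : List Int) (j i m : Nat) (hdom : pvBeatsB ct j i = true)
    (h1 : j < m) (h2 : m ≤ i) : ct.getD m 0 < ct.getD j 0 := by
  have := List.all_eq_true.mp hdom m (by
    rw [List.mem_range'_1]
    omega)
  simpa using this

lemma pvDq_c_strict (ct : List Int) (K i : Nat) :
    (pvDq ct K i).Pairwise (fun a b => ct.getD b 0 < ct.getD a 0) := by
  apply List.Pairwise.imp_of_mem _ (pvDq_sorted ct K i)
  intro a b ha hb hab
  have ha' := (pvDq_mem ct K i a).mp ha
  have hb' := (pvDq_mem ct K i b).mp hb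
  exact pvBeatsB_lt ct a i b ha'.2.2 hab hb'.1

lemma pvBeatsB_self (ct : List Int) (i : Nat) : pvBeatsB ct i i = true := by
  simp [pvBeatsB]

lemma pvSelf_mem_pvDq (ct : List Int) (K i : Nat) (hK : 1 ≤ K) : i ∈ pvDq ct K i :=
  (pvDq_mem ct K i i).mpr ⟨le_refl i, by omega, pvBeatsB_self ct i⟩

lemma pvBeatsB_succ (ct : List Int) (j t : Nat) (hj : j ≤ t) :
    pvBeatsB ct j (t + 1) = (pvBeatsB ct j t && decide (ct.getD (t + 1) 0 < ct.getD j 0)) := by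
  unfold pvBeatsB
  have hsplit : List.range' (j + 1) (t + 1 - j) = List.range' (j + 1) (t - j) ++ [t + 1] := by
    rw [show t + 1 - j = (t - j) + 1 from by omega, List.range'_1_concat]
    congr 2
    omega
  rw [hsplit, List.all_append]
  simp

-- one full deque update (pop back, append i, pop stale front) turns the entry deque into pvDq i
lemma pvDq_step (ct : List Int) (K i : Nat) (hK : 1 ≤ K) :
    ((pvPopBackWhile (fun j => decide (ct.getD j 0 ≤ ct.getD i 0)) (pvEntryDq ct K i))
        ++ [i]).dropWhile (fun j => decide (j + K ≤ i)) = pvDq ct K i := by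
  have hmid : (pvPopBackWhile (fun j => decide (ct.getD j 0 ≤ ct.getD i 0)) (pvEntryDq ct K i))
      ++ [i] = (List.range (i + 1)).filter (fun j => decide (i ≤ j + K) && pvBeatsB ct j i) := by
    cases i with
    | zero =>
      simp [pvEntryDq, pvPopBackWhile, pvBeatsB, List.range_succ]
    | succ t =>
      simp only [pvEntryDq]
      rw [pvPopBackWhile_eq_filter _ _ ((pvDq_c_strict ct K t).imp (by
        intro a b hba hpa
        simp only [decide_eq_true_eq] at *
        omega))]
      conv_rhs => rw [List.range_succ]
      rw [List.filter_append]
      congr 1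
      · rw [pvDq, List.filter_filter]
        apply List.filter_congr
        intro j hj
        have hjt : j < t + 1 := List.mem_range.mp hj
        rw [pvBeatsB_succ ct j t (by omega)]
        rw [Bool.eq_iff_iff]
        simp only [Bool.and_eq_true, Bool.not_eq_true', decide_eq_false_iff_not,
          decide_eq_true_eq]
        constructor
        · rintro ⟨h1, h2, h3⟩
          exact ⟨by omega, h3, by omega⟩
        · rintro ⟨h1, h2, h3⟩
          exact ⟨by omega, by omega, h2⟩
      · symm
        apply List.filter_eq_self.mpr
        intro a ha
        have ha' : a = t + 1 := by simpa using ha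
        subst ha'
        rw [pvBeatsB_self, Bool.and_true, decide_eq_true_eq]
        omega
  rw [hmid, pvDropWhile_eq_filter _ _ (List.Pairwise.filter _ List.pairwise_lt_range)
    (by
      intro a b hab hb
      simp only [decide_eq_true_eq] at *
      omega)]
  rw [List.filter_filter, pvDq]
  apply List.filter_congr
  intro j _
  rw [Bool.eq_iff_iff]
  simp only [Bool.and_eq_true, Bool.not_eq_true', decide_eq_false_iff_not, decide_eq_true_eq]
  constructor
  · rintro ⟨h1, h2, h3⟩
    exact ⟨by omega, h3⟩
  · rintro ⟨h1, h2⟩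
    exact ⟨by omega, by omega, h2⟩

-- each window index is weakly dominated by a dominating index to its right
lemma pvExists_dom (ct : List Int) (i : Nat) :
    ∀ (d m : Nat), i - m ≤ d → m ≤ i →
      ∃ j, m ≤ j ∧ j ≤ i ∧ pvBeatsB ct j i = true ∧ ct.getD m 0 ≤ ct.getD j 0 := by
  intro d
  induction d with
  | zero =>
    intro m h1 h2
    have hmi : m = i := by omega
    subst hmi
    exact ⟨m, le_refl _, le_refl _, pvBeatsB_self ct m, le_refl _⟩
  | succ d ih =>
    intro m h1 h2
    by_cases hdom : pvBeatsB ct m i = true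
    · exact ⟨m, le_refl _, h2, hdom, le_refl _⟩
    · have hex : ∃ m', m' ∈ List.range' (m + 1) (i - m) ∧ ¬ (ct.getD m' 0 < ct.getD m 0) := by
        by_contra hc
        push_neg at hc
        apply hdom
        apply List.all_eq_true.mpr
        intro x hx
        exact decide_eq_true (hc x hx)
      obtain ⟨m', hm', hge⟩ := hex
      have hm'b := List.mem_range'_1.mp hm'
      obtain ⟨j, hj1, hj2, hj3, hj4⟩ := ih m' (by omega) (by omega)
      refine ⟨j, by omega, hj2, hj3, by omega⟩

lemma pvWMax_mem (ct : List Int) (j K : Nat) (hK : 1 ≤ K) :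
    ∃ m, j ≤ m ∧ m < j + K ∧ pvWMax ct j K = ct.getD m 0 := by
  unfold pvWMax
  rcases PySem.List.foldl_max_mem (pvWin ct (j + 1) (K - 1)) (ct.getD j 0) with h | h
  · exact ⟨j, le_refl _, by omega, h⟩
  · simp only [pvWin, List.mem_map] at h
    obtain ⟨m, hm, hme⟩ := h
    rw [List.mem_range'_1] at hm
    exact ⟨m, by omega, by omega, hme.symm⟩

lemma pvWMax_ge (ct : List Int) (j K : Nat) (m : Nat) (h1 : j ≤ m) (h2 : m < j + K) :
    ct.getD m 0 ≤ pvWMax ct j K := by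
  unfold pvWMax
  obtain ⟨hinit, hall⟩ := PySem.List.le_foldl_max (pvWin ct (j + 1) (K - 1)) (ct.getD j 0)
  rcases eq_or_lt_of_le h1 with he | hlt
  · exact he ▸ hinit
  · apply hall
    simp only [pvWin, List.mem_map]
    exact ⟨m, List.mem_range'_1.mpr ⟨by omega, by omega⟩, rfl⟩

-- the head of the deque carries the maximum charge time of the current window
lemma pvDq_head_max (ct : List Int) (K i : Nat) (hK : 1 ≤ K) (hKi : K ≤ i + 1) :
    ct.getD ((pvDq ct K i).headD 0) 0 = pvWMax ct (i + 1 - K) K := by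
  have hne : pvDq ct K i ≠ [] := List.ne_nil_of_mem (pvSelf_mem_pvDq ct K i hK)
  obtain ⟨hd, tl, heq⟩ := List.exists_cons_of_ne_nil hne
  rw [heq, List.headD_cons]
  have hhdmem : hd ∈ pvDq ct K i := by
    rw [heq]
    exact List.mem_cons_self
  obtain ⟨hhd1, hhd2, hhd3⟩ := (pvDq_mem ct K i hd).mp hhdmem
  have hupper : ∀ m, i + 1 - K ≤ m → m ≤ i → ct.getD m 0 ≤ ct.getD hd 0 := by
    intro m hm1 hm2
    obtain ⟨j, hj1, hj2, hj3, hj4⟩ := pvExists_dom ct i (i - m) m (le_refl _) hm2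
    have hjmem : j ∈ pvDq ct K i := (pvDq_mem ct K i j).mpr ⟨hj2, by omega, hj3⟩
    rw [heq, List.mem_cons] at hjmem
    rcases hjmem with rfl | hjtl
    · exact hj4
    · have hlt : hd < j := by
        have hp := pvDq_sorted ct K i
        rw [heq, List.pairwise_cons] at hp
        exact hp.1 j hjtl
      have := pvBeatsB_lt ct hd i j hhd3 hlt hj2
      omega
  apply le_antisymm
  · exact pvWMax_ge ct (i + 1 - K) K hd (by omega) (by omega)
  · obtain ⟨m, hm1, hm2, hme⟩ := pvWMax_mem ct (i + 1 - K) K hK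
    rw [hme]
    exact hupper m hm1 (by omega)

lemma pvEntrySum_zero (rc : List Int) (K : Nat) : pvEntrySum rc K 0 = 0 := by
  simp [pvEntrySum, pvSum, pvWin]

lemma pvEntrySum_add (rc : List Int) (K i : Nat) (hK : 1 ≤ K) :
    pvEntrySum rc K i + rc.getD i 0 = pvSum rc (i + 1 - K) (min (i + 1) K) := by
  unfold pvEntrySum
  rw [show min (i + 1) K = min i (K - 1) + 1 from by omega,
    show i + 1 - K = i - (K - 1) from by omega, pvSum_succ,
    show i - (K - 1) + min i (K - 1) = i from by omega]

lemma pvEntrySum_check (rc : List Int) (K i : Nat) (hK : 1 ≤ K) (hKi : K ≤ i + 1) :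
    pvEntrySum rc K (i + 1) = pvSum rc (i + 1 - K) (min (i + 1) K) - rc.getD (i + 1 - K) 0 := by
  rw [show min (i + 1) K = K from by omega]
  have hcons : pvSum rc (i + 1 - K) K = rc.getD (i + 1 - K) 0 + pvSum rc (i + 1 - K + 1) (K - 1) := by
    obtain ⟨L, hL⟩ : ∃ L, K = L + 1 := ⟨K - 1, by omega⟩
    subst hL
    simpa using pvSum_cons rc (i + 1 - (L + 1)) L
  rw [hcons]
  unfold pvEntrySum
  rw [show (i + 1) - (K - 1) = i + 1 - K + 1 from by omega,
    show min (i + 1) (K - 1) = K - 1 from by omega]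
  ring

lemma pvEntrySum_nocheck (rc : List Int) (K i : Nat) (hKi : i + 1 < K) :
    pvEntrySum rc K (i + 1) = pvSum rc (i + 1 - K) (min (i + 1) K) := by
  unfold pvEntrySum
  rw [show (i + 1) - (K - 1) = 0 from by omega, show min (i + 1) (K - 1) = i + 1 from by omega,
    show i + 1 - K = 0 from by omega, show min (i + 1) K = i + 1 from by omega]

-- the main loop invariant: A's loop from i computes "some later window fits"
lemma pvGo_eq (ct rc : List Int) (budget : Int) (K : Nat) (hK : 1 ≤ K) :
    ∀ (d i : Nat) (sumv : Int) (dq : List Nat), ct.length - i ≤ d →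
      sumv = pvEntrySum rc K i → dq = pvEntryDq ct K i →
      in_budget_go (K : Int) ct rc budget ct.length i sumv dq =
        (List.range' i (ct.length - i)).any
          (fun t => decide (K ≤ t + 1) && pvOk ct rc budget K (t + 1 - K)) := by
  intro d
  induction d with
  | zero =>
    intro i sumv dq hd hsum hdq
    have hni : ¬ i < ct.length := by omega
    rw [in_budget_go, dif_neg hni, show ct.length - i = 0 from by omega]
    simp
  | succ d ih =>
    intro i sumv dq hd hsum hdq
    by_cases hi : i < ct.length
    · subst hsum hdq
      rw [in_budget_go, dif_pos hi]
      simp only [PySem.List.pyGetD_natCast]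
      rw [show (fun j : Nat => decide ((j : Int) ≤ (i : Int) - (K : Int)))
            = (fun j : Nat => decide (j + K ≤ i)) from by
          funext j
          simp only [decide_eq_decide]
          omega]
      rw [pvDq_step ct K i hK]
      rw [show ct.length - i = (ct.length - (i + 1)) + 1 from by omega, List.range'_succ,
        List.any_cons]
      by_cases hKi : K ≤ i + 1
      · rw [if_pos (show (i : Int) - (K : Int) + 1 ≥ 0 from by omega)]
        have hhead : (ct.getD ((pvDq ct K i).headD 0) 0 : Int) = pvWMax ct (i + 1 - K) K :=
          pvDq_head_max ct K i hK hKi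
        have hsum1 : pvEntrySum rc K i + rc.getD i 0 = pvSum rc (i + 1 - K) K := by
          rw [pvEntrySum_add rc K i hK, show min (i + 1) K = K from by omega]
        rw [hhead, hsum1]
        by_cases hC : pvWMax ct (i + 1 - K) K + (K : Int) * pvSum rc (i + 1 - K) K ≤ budget
        · rw [if_pos hC]
          simp [pvOk, hKi, hC]
        · rw [if_neg hC]
          rw [show (i : Int) - (K : Int) + 1 = ((i + 1 - K : Nat) : Int) from by omega]
          simp only [PySem.List.pyGetD_natCast]
          rw [ih (i + 1) (pvSum rc (i + 1 - K) K - rc.getD (i + 1 - K) 0) (pvDq ct K i)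
            (by omega)
            (by
              rw [pvEntrySum_check rc K i hK hKi, show min (i + 1) K = K from by omega])
            rfl]
          simp [pvOk, hC]
      · rw [if_neg (show ¬ ((i : Int) - (K : Int) + 1 ≥ 0) from by omega)]
        rw [ih (i + 1) (pvEntrySum rc K i + rc.getD i 0) (pvDq ct K i)
          (by omega)
          (by rw [pvEntrySum_nocheck rc K i (by omega), ← pvEntrySum_add rc K i hK])
          rfl]
        simp [show ¬ (K ≤ i + 1) from hKi]
    · rw [in_budget_go, dif_neg hi, show ct.length - i = 0 from by omega]
      simp

-- B-side helpers: the prefix-sum list built by the foldl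
def pvPrefixList (a : Int) : List Int → List Int
  | [] => []
  | c :: l => (a + c) :: pvPrefixList (a + c) l

lemma pvFold_prefix : ∀ (l ps : List Int) (a : Int),
    l.foldl (fun ps c => ps ++ [PySem.List.pyGetD ps (-1) 0 + c]) (ps ++ [a]) =
      (ps ++ [a]) ++ pvPrefixList a l := by
  intro l
  induction l with
  | nil =>
    intro ps a
    simp [pvPrefixList]
  | cons c l ih =>
    intro ps a
    rw [List.foldl_cons, PySem.List.pyGetD_neg_one_append_singleton,
      show (ps ++ [a]) ++ [a + c] = (ps ++ [a]) ++ [a + c] from rfl, ih (ps ++ [a]) (a + c)]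
    simp [pvPrefixList]

lemma pvPrefixList_getD : ∀ (l : List Int) (a : Int) (t : Nat), t < l.length →
    (pvPrefixList a l).getD t 0 = a + (l.take (t + 1)).sum := by
  intro l
  induction l with
  | nil =>
    intro a t h
    simp at h
  | cons c l ih =>
    intro a t h
    cases t with
    | zero => simp [pvPrefixList]
    | succ s =>
      simp only [pvPrefixList, List.getD_cons_succ]
      rw [ih (a + c) s (by simp at h; omega)]
      simp [List.take_succ_cons]
      ring

lemma pvPfx_getD (rc : List Int) (n t : Nat) (hn : n ≤ rc.length) (ht : t ≤ n) :
    (0 :: pvPrefixList 0 (rc.take n)).getD t 0 = (rc.take t).sum := by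
  cases t with
  | zero => simp
  | succ s =>
    rw [List.getD_cons_succ, pvPrefixList_getD (rc.take n) 0 s (by
      rw [List.length_take]
      omega)]
    rw [List.take_take, show min (s + 1) n = s + 1 from by omega]
    simp

lemma pvDropTake (l : List Int) (j K : Nat) (h : j + K ≤ l.length) :
    (l.drop j).take K = pvWin l j K := by
  apply List.ext_getElem
  · simp [pvWin, List.length_take, List.length_drop]
    omega
  · intro t h1 h2
    have h2' : t < K := by
      simpa [pvWin] using h2
    rw [List.getElem_take, List.getElem_drop]
    simp only [pvWin, List.getElem_map, List.getElem_range'_1]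
    rw [List.getD_eq_getElem _ _ (by omega)]

lemma pvTakeSum_diff (rc : List Int) (j K : Nat) (h : j + K ≤ rc.length) :
    (rc.take (j + K)).sum - (rc.take j).sum = pvSum rc j K := by
  rw [List.take_add, List.sum_append, pvDropTake rc j K h]
  unfold pvSum
  omega

-- B computes "some window fits" by direct enumeration
lemma pvAlt_eq (ct rc : List Int) (budget : Int) (K : Nat) (hK : 1 ≤ K)
    (hlen : ct.length ≤ rc.length) :
    in_budget_alt (K : Int) ct rc budget =
      (List.range (ct.length + 1 - K)).any (fun j => pvOk ct rc budget K j) := by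
  unfold in_budget_alt
  simp only [PySem.List.slice_to_natCast]
  have hpfx : (rc.take ct.length).foldl (fun ps c => ps ++ [PySem.List.pyGetD ps (-1) 0 + c]) [0]
      = 0 :: pvPrefixList 0 (rc.take ct.length) := by
    have h := pvFold_prefix (rc.take ct.length) [] 0
    simpa using h
  rw [hpfx]
  by_cases hKn : K ≤ ct.length + 1
  · rw [show (ct.length : Int) - (K : Int) + 1 = ((ct.length + 1 - K : Nat) : Int) from by omega]
    rw [PySem.List.pyRange_zero_nat, List.any_map]
    apply PySem.List.any_congr_mem
    intro jn hjn
    have hjn' : jn < ct.length + 1 - K := List.mem_range.mp hjn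
    have hwin : jn + K ≤ ct.length := by omega
    simp only [Function.comp]
    rw [show ((jn : Int) + (K : Int)) = ((jn + K : Nat) : Int) from by push_cast; ring]
    rw [PySem.List.slice_natCast, show jn + K - jn = K from by omega, pvDropTake ct jn K hwin]
    have hco : pvWin ct jn K = ct.getD jn 0 :: pvWin ct (jn + 1) (K - 1) := by
      conv_lhs => rw [show K = (K - 1) + 1 from by omega]
      exact pvWin_cons ct jn (K - 1)
    rw [hco, PySem.List.max?_id_cons, Option.getD_some]
    simp only [PySem.List.pyGetD_natCast]
    rw [pvPfx_getD rc ct.length (jn + K) hlen hwin,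
      pvPfx_getD rc ct.length jn hlen (by omega),
      pvTakeSum_diff rc jn K (by omega)]
    rfl
  · rw [PySem.List.pyRange_one_eq_nil (show (ct.length : Int) - (K : Int) + 1 ≤ 0 from by omega)]
    rw [show ct.length + 1 - K = 0 from by omega]
    simp

-- ===== VERDICT (by name: the statement is the Claim_ definition above) =====
theorem in_budget_spec : Claim_equal_in_budget := by
  intro k ct rc budget _ hPre
  obtain ⟨hk1, hlen⟩ := hPre
  unfold Spec_in_budget
  obtain ⟨K, hk, hK⟩ : ∃ K : Nat, k = (K : Int) ∧ 1 ≤ K := ⟨k.toNat, by omega, by omega⟩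
  subst hk
  unfold in_budget
  rw [pvGo_eq ct rc budget K hK ct.length 0 0 [] (by omega) (pvEntrySum_zero rc K).symm rfl]
  rw [pvAlt_eq ct rc budget K hK hlen]
  rw [Nat.sub_zero]
  rw [Bool.eq_iff_iff, List.any_eq_true, List.any_eq_true]
  constructor
  · rintro ⟨t, ht, hb⟩
    have ht' : t < ct.length := by
      have := List.mem_range'_1.mp ht
      omega
    simp only [Bool.and_eq_true, decide_eq_true_eq] at hb
    exact ⟨t + 1 - K, List.mem_range.mpr (by omega), hb.2⟩
  · rintro ⟨j, hj, hb⟩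
    have hj' : j < ct.length + 1 - K := List.mem_range.mp hj
    refine ⟨j + K - 1, List.mem_range'_1.mpr (by omega), ?_⟩
    simp only [Bool.and_eq_true, decide_eq_true_eq]
    refine ⟨by omega, ?_⟩
    rw [show j + K - 1 + 1 - K = j from by omega]
    exact hb
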